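-- pv_equiv track=rewrite | github.com/Agent-006/DSA-Python-JavaScript | array_problems/level_easy/find_the_number/better/hashing_using_map/main.py | find_number_appear_once
-- ===== SOURCE A (Python) =====
-- def find_number_appear_once(arr: list, n: int):
--     hash_map = {}  # Create an empty dictionary to store the count of each element
--
--     for i in range(n):  # Iterate through the array
--         if arr[i] in hash_map:  # If the element is already present in the dictionary
--             hash_map[arr[i]] += 1  # Increment its count by 1
--         else:  # If the element is not present in the dictionary
--             hash_map[arr[i]] = 1  # Add it to the dictionary with a count of 1
--
--     for key, value in hash_map.items():  # Iterate through the dictionary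
--         if value == 1:  # If the count of an element is 1
--             return key  # Return that element
-- ===== SOURCE B (Python) =====
-- def find_number_appear_once(arr: list, n: int):
--     seen_once = set()
--     seen_multiple = set()
--     for i in range(n):
--         x = arr[i]
--         if x in seen_multiple:
--             pass
--         elif x in seen_once:
--             seen_once.discard(x)
--             seen_multiple.add(x)
--         else:
--             seen_once.add(x)
--     for i in range(n):
--         if arr[i] in seen_once:
--             return arr[i]
-- ===== Notes on version B (the rewrite author's own statement) =====
-- stated objective: alternative
-- what changed: A builds a dict of counts and then scans the dict's items for the first count-1 key; B never counts: one pass moves each element between a seen_once and a seen_multiple set, then a second pass over the indices returns the first element still in seen_once.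
import Mathlib
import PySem

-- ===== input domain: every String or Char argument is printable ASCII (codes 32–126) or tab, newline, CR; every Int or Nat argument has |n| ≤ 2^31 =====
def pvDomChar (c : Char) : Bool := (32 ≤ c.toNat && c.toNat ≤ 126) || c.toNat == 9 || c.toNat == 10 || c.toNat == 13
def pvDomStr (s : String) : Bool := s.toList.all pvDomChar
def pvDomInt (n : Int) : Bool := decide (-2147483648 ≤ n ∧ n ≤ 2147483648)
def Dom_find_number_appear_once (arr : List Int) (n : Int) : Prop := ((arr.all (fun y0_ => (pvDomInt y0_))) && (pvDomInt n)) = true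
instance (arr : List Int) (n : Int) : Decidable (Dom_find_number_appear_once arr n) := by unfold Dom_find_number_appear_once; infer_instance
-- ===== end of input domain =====

-- B replaces A's count dictionary by two sets (seen-once / seen-multiple) maintained in one pass
-- and a second pass over the indices returning the first element still in seen-once (objective: alternative).

-- ===== PORT A =====
-- A's second loop: first key in the items list whose count is 1
def aScan : List (Int × Int) → Option Int
  | [] => none
  | (k, v) :: rest => if v == 1 then some k else aScan rest

-- A's first loop; arr[i] is ported as pyGetD arr i 0: Pre_ guarantees every index of range(n) is in range, where pyGetD is exact
def aCount (arr : List Int) (n : Int) : PySem.Dict Int Int :=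
  (PySem.List.pyRange 0 n 1).foldl
    (fun d i =>
      if d.contains (PySem.List.pyGetD arr i 0) then
        d.insert (PySem.List.pyGetD arr i 0) (d.getD (PySem.List.pyGetD arr i 0) 0 + 1)
      else d.insert (PySem.List.pyGetD arr i 0) 1)
    PySem.Dict.empty

def find_number_appear_once (arr : List Int) (n : Int) : Option Int :=
  aScan (aCount arr n).items

-- ===== PORT B =====
-- one step of B's first loop on the state (seen_once, seen_multiple)
def bStep (s : PySem.Set Int × PySem.Set Int) (x : Int) : PySem.Set Int × PySem.Set Int :=
  if PySem.Set.contains s.2 x then s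
  else if PySem.Set.contains s.1 x then (PySem.Set.discard s.1 x, PySem.Set.add s.2 x)
  else (PySem.Set.add s.1 x, s.2)

-- B's first loop (arr[i] as in port A: exact under Pre_)
def bSets (arr : List Int) (n : Int) : PySem.Set Int × PySem.Set Int :=
  (PySem.List.pyRange 0 n 1).foldl (fun s i => bStep s (PySem.List.pyGetD arr i 0))
    (PySem.Set.empty, PySem.Set.empty)

-- B's second loop: first arr[i] (i over range(n)) still in seen_once
def bScan (arr : List Int) (once : PySem.Set Int) : List Int → Option Int
  | [] => none
  | i :: rest =>
      if PySem.Set.contains once (PySem.List.pyGetD arr i 0) then some (PySem.List.pyGetD arr i 0)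
      else bScan arr once rest

def find_number_appear_once_alt (arr : List Int) (n : Int) : Option Int :=
  bScan arr (bSets arr n).1 (PySem.List.pyRange 0 n 1)

-- ===== PRECONDITION & SPEC =====
-- Pre_ excludes exactly the inputs where Python's arr[i] raises IndexError (n > len(arr)).
def Pre_find_number_appear_once (arr : List Int) (n : Int) : Prop := n ≤ (arr.length : Int)
instance (arr : List Int) (n : Int) : Decidable (Pre_find_number_appear_once arr n) := by unfold Pre_find_number_appear_once; infer_instance
def pvWitness_find_number_appear_once : List Int × Int := ([4, 1, 4, 2, 2], 5)

def Spec_find_number_appear_once (arr : List Int) (n : Int) (out : Option Int) : Prop := out = find_number_appear_once_alt arr n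
instance (arr : List Int) (n : Int) (out : Option Int) : Decidable (Spec_find_number_appear_once arr n out) := by unfold Spec_find_number_appear_once; infer_instance

-- ===== CLAIM (what is proved, stated in full; the proofs are below) =====
def Claim_equal_find_number_appear_once : Prop := ∀ (arr : List Int) (n : Int), Dom_find_number_appear_once arr n → Pre_find_number_appear_once arr n → Spec_find_number_appear_once arr n (find_number_appear_once arr n)

-- ===== LEMMAS AND PROOFS =====

theorem contains_add (s : PySem.Set Int) (a x : Int) :
    PySem.Set.contains (PySem.Set.add s a) x = (PySem.Set.contains s x || decide (x = a)) := by
  simp [PySem.Set.contains, List.contains_eq_mem, PySem.Set.mem_add s a x]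

theorem contains_discard (s : PySem.Set Int) (a x : Int) :
    PySem.Set.contains (PySem.Set.discard s a) x = (PySem.Set.contains s x && !decide (x = a)) := by
  simp [PySem.Set.discard, PySem.Set.contains, List.contains_eq_mem, List.mem_filter]

theorem bStep_of_multi (s : PySem.Set Int × PySem.Set Int) (x : Int)
    (h : PySem.Set.contains s.2 x = true) : bStep s x = s := by
  simp only [PySem.Set.contains, List.contains_eq_mem, decide_eq_true_eq] at h
  simp [bStep, h]

theorem bStep_of_once (s : PySem.Set Int × PySem.Set Int) (x : Int)
    (h2 : PySem.Set.contains s.2 x = false) (h1 : PySem.Set.contains s.1 x = true) :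
    bStep s x = (PySem.Set.discard s.1 x, PySem.Set.add s.2 x) := by
  simp only [PySem.Set.contains, List.contains_eq_mem, decide_eq_true_eq,
    decide_eq_false_iff_not] at h1 h2
  simp [bStep, h1, h2]

theorem bStep_of_new (s : PySem.Set Int × PySem.Set Int) (x : Int)
    (h2 : PySem.Set.contains s.2 x = false) (h1 : PySem.Set.contains s.1 x = false) :
    bStep s x = (PySem.Set.add s.1 x, s.2) := by
  simp only [PySem.Set.contains, List.contains_eq_mem, decide_eq_false_iff_not] at h1 h2
  simp [bStep, h1, h2]

-- A's item scan is a find? over the items list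
theorem aScan_eq_find? (l : List (Int × Int)) :
    aScan l = (l.find? (fun kv => kv.2 == 1)).map Prod.fst := by
  induction l with
  | nil => rfl
  | cons kv rest ih =>
      obtain ⟨k, v⟩ := kv
      by_cases h : v = 1
      · rw [List.find?_cons_of_pos (by simpa using h)]; simp [aScan, h]
      · rw [List.find?_cons_of_neg (by simpa using h)]; simpa [aScan, h] using ih

-- B's index scan is a find? over the fetched elements
theorem bScan_eq_find? (arr : List Int) (once : PySem.Set Int) (is : List Int) :
    bScan arr once is = (is.map (fun i => PySem.List.pyGetD arr i 0)).find?
      (fun x => PySem.Set.contains once x) := by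
  induction is with
  | nil => rfl
  | cons i rest ih =>
      rw [List.map_cons]
      simp only [bScan]
      cases h : PySem.Set.contains once (PySem.List.pyGetD arr i 0)
      · rw [if_neg (Bool.false_ne_true), List.find?_cons_of_neg (by simpa using h), ih]
      · rw [if_pos rfl, List.find?_cons_of_pos (by simpa using h)]

-- A's loop body is the counter step
theorem stepA_eq (arr : List Int) (d : PySem.Dict Int Int) (i : Int) :
    (if d.contains (PySem.List.pyGetD arr i 0) then
       d.insert (PySem.List.pyGetD arr i 0) (d.getD (PySem.List.pyGetD arr i 0) 0 + 1)
     else d.insert (PySem.List.pyGetD arr i 0) 1)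
    = d.insert (PySem.List.pyGetD arr i 0) (d.getD (PySem.List.pyGetD arr i 0) 0 + 1) := by
  by_cases h : d.contains (PySem.List.pyGetD arr i 0)
  · simp [h]
  · rw [if_neg h, PySem.Dict.getD_of_not_contains _ _ (by simpa using h)]
    norm_num

-- invariant of B's first loop: after processing t, seen_once holds exactly the count-1
-- elements of t and seen_multiple exactly the count-≥2 elements
theorem bFold_contains (t : List Int) :
    (∀ x, PySem.Set.contains (t.foldl bStep (PySem.Set.empty, PySem.Set.empty)).1 x = decide (t.count x = 1)) ∧
    (∀ x, PySem.Set.contains (t.foldl bStep (PySem.Set.empty, PySem.Set.empty)).2 x = decide (2 ≤ t.count x)) := by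
  induction t using List.reverseRecOn with
  | nil => constructor <;> intro x <;> simp [PySem.Set.contains, PySem.Set.empty]
  | append_singleton t a ih =>
      obtain ⟨h1, h2⟩ := ih
      rw [List.foldl_append, List.foldl_cons, List.foldl_nil]
      by_cases hma : (2 : ℕ) ≤ t.count a
      · rw [bStep_of_multi _ _ (by rw [h2]; simpa using hma)]
        constructor <;> intro x <;> [rw [h1]; rw [h2]] <;>
          rw [List.count_append, List.count_singleton] <;>
          by_cases hxa : a = x <;>
          · first
            | (subst hxa; rw [if_pos (by simp)]; simp only [decide_eq_decide]; omega)
            | (rw [if_neg (by simpa using hxa), Nat.add_zero])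
      · by_cases hoa : t.count a = 1
        · rw [bStep_of_once _ _ (by rw [h2]; simpa using hma) (by rw [h1]; simpa using hoa)]
          constructor <;> intro x
          · rw [contains_discard, h1]
            by_cases hxa : x = a
            · subst hxa
              simp [List.count_append, hoa]
            · simp only [List.count_append, List.count_singleton,
                if_neg (by simpa using Ne.symm hxa), beq_iff_eq, hxa]
              simp
          · rw [contains_add, h2]
            by_cases hxa : x = a
            · subst hxa
              simp [List.count_append, hoa]
            · simp only [List.count_append, List.count_singleton,
                if_neg (by simpa using Ne.symm hxa), beq_iff_eq, hxa]
              simp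
        · rw [bStep_of_new _ _ (by rw [h2]; simpa using hma) (by rw [h1]; simpa using hoa)]
          constructor <;> intro x
          · rw [contains_add, h1]
            by_cases hxa : x = a
            · subst hxa
              have h0 : t.count x = 0 := by omega
              simp [List.count_append, h0]
            · simp only [List.count_append, List.count_singleton,
                if_neg (by simpa using Ne.symm hxa), beq_iff_eq, hxa]
              simp
          · rw [h2]
            by_cases hxa : x = a
            · subst hxa
              have h0 : t.count x = 0 := by omega
              simp [List.count_append, h0]
            · rw [List.count_append, List.count_singleton, if_neg (by simpa using Ne.symm hxa)]
              simp

-- find? over the first-occurrence list equals find? over the full list when every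
-- element satisfying the predicate occurs at most once
theorem find?_foldl_add (p : Int → Bool) :
    ∀ (t acc : List Int), (∀ x, p x = true → x ∈ acc → x ∉ t) → (∀ x, p x = true → t.count x ≤ 1) →
      (t.foldl PySem.Set.add acc).find? p = (acc.find? p).or (t.find? p) := by
  intro t
  induction t with
  | nil => intro acc _ _; simp
  | cons a t ih =>
      intro acc hdisj hcnt
      have hcnt' : ∀ x, p x = true → t.count x ≤ 1 := by
        intro x hx
        have := hcnt x hx
        rw [List.count_cons] at this
        omega
      by_cases hmem : a ∈ acc
      · have hpa : p a = false := by
          by_contra h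
          exact hdisj a (by simpa using h) hmem (List.mem_cons_self)
        have hadd : PySem.Set.add acc a = acc := by
          simp [PySem.Set.add, PySem.Set.contains, List.contains_eq_mem, hmem]
        rw [List.foldl_cons, hadd,
          ih acc (fun x hx hxa hxt => hdisj x hx hxa (List.mem_cons_of_mem _ hxt)) hcnt',
          List.find?_cons_of_neg (by simp [hpa])]
      · have hadd : PySem.Set.add acc a = acc ++ [a] := by
          simp [PySem.Set.add, PySem.Set.contains, List.contains_eq_mem, hmem]
        have hnotin : ∀ x, p x = true → x ∈ acc ++ [a] → x ∉ t := by
          intro x hx hxm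
          rcases List.mem_append.mp hxm with h | h
          · exact fun hxt => hdisj x hx h (List.mem_cons_of_mem _ hxt)
          · have hxa : x = a := by simpa using h
            subst hxa
            have hc := hcnt x hx
            simp only [List.count_cons, beq_self_eq_true, if_pos] at hc
            intro hxt
            have := List.count_pos_iff.mpr hxt
            omega
        rw [List.foldl_cons, hadd, ih (acc ++ [a]) hnotin hcnt', List.find?_append]
        cases hpa : p a
        · rw [List.find?_cons_of_neg (by simp [hpa])]
          simp [hpa]
        · rw [List.find?_cons_of_pos hpa]
          simp [hpa]

-- the two predicates (Int-valued dict count == 1, Nat count = 1) agree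
theorem pred_eq (t : List Int) (x : Int) :
    (((t.count x : Int)) == 1) = decide (t.count x = 1) := by
  by_cases h : t.count x = 1 <;> simp [h]

-- ===== VERDICT (by name: the statement is the Claim_ definition above) =====
theorem find_number_appear_once_spec : Claim_equal_find_number_appear_once := by
  intro arr n _ _
  unfold Spec_find_number_appear_once find_number_appear_once find_number_appear_once_alt
  set t := (PySem.List.pyRange 0 n 1).map (fun i => PySem.List.pyGetD arr i 0) with ht
  -- A's dict is the counter of the fetched elements
  have hA : aCount arr n = PySem.Dict.counter t := by
    unfold aCount
    rw [← PySem.Dict.foldl_insert_getD_add_one_eq_counter, ht, List.foldl_map]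
    exact PySem.List.foldl_congr_mem _ _ _ _ (fun d i _ => stepA_eq arr d i)
  -- B's loop over the range is the fold of bStep over the fetched elements
  have hBsets : bSets arr n = t.foldl bStep (PySem.Set.empty, PySem.Set.empty) := by
    unfold bSets
    rw [ht, List.foldl_map]
  rw [hA, aScan_eq_find?, PySem.Dict.items_counter, List.find?_map,
    bScan_eq_find?, ← ht, hBsets]
  have hBf : (fun x => PySem.Set.contains
      ((t.foldl bStep (PySem.Set.empty, PySem.Set.empty)).1) x)
      = fun x => decide (t.count x = 1) :=
    funext fun x => (bFold_contains t).1 x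
  rw [hBf]
  have hcomp : ((fun kv : Int × Int => kv.2 == 1) ∘ fun k => (k, (t.count k : Int)))
      = fun x => decide (t.count x = 1) := by
    funext x
    simp only [Function.comp]
    exact pred_eq t x
  rw [hcomp]
  have hofl : PySem.Set.ofList t = t.foldl PySem.Set.add [] := PySem.Set.ofList_eq_foldl t
  rw [hofl, find?_foldl_add (fun x => decide (t.count x = 1)) t []
      (by intro x _ hx; simp at hx)
      (by intro x hx; simp at hx; omega)]
  simp only [List.find?_nil, Option.none_or]
  cases h : t.find? (fun x => decide (t.count x = 1)) with
  | none => simp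
  | some v =>
      have hv : t.count v = 1 := by simpa using List.find?_some h
      simp
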